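-- pv_equiv track=rewrite | github.com/KieranM279/SymphonyHub | ViralPeak.py | INSTINCT_Dictmaker
-- ===== SOURCE A (Python) =====
-- def INSTINCT_Dictmaker(data):
--     dictionary = {}
--
--     # loop through the length of the dataframe
--     for i in range(len(data['id_sub'])):
--
--         loads = list()
--
--         # Loop through each column in the dataframe
--         for col in data:
--             # skip the ID column
--             if col =='id_sub':
--                 continue
--
--             # Add load to list
--             loads.append(data[col][i])
--
--         # add list of loads to dicionary
--         dictionary[data['id_sub'][i]] = loads
--
--     return(dictionary)
-- ===== SOURCE B (Python) =====
-- def INSTINCT_Dictmaker(data):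
--     ids = data['id_sub']
--     # column-major accumulation: grow each row's load list one column at a time
--     rows = [[] for _ in ids]
--     for col in data:
--         if col != 'id_sub':
--             vals = data[col]
--             for j in range(len(ids)):
--                 rows[j].append(vals[j])
--     out = {}
--     for j in range(len(ids)):
--         out[ids[j]] = rows[j]
--     return out
-- ===== Notes on version B (the rewrite author's own statement) =====
-- stated objective: alternative
-- what changed: Swaps the traversal order: instead of A's row-major nested loops that rebuild each load list cell by cell, B accumulates column-major, appending each non-id column's cells to a preallocated list of per-row accumulators, then keys the finished rows by id in a final pass.
import Mathlib
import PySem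

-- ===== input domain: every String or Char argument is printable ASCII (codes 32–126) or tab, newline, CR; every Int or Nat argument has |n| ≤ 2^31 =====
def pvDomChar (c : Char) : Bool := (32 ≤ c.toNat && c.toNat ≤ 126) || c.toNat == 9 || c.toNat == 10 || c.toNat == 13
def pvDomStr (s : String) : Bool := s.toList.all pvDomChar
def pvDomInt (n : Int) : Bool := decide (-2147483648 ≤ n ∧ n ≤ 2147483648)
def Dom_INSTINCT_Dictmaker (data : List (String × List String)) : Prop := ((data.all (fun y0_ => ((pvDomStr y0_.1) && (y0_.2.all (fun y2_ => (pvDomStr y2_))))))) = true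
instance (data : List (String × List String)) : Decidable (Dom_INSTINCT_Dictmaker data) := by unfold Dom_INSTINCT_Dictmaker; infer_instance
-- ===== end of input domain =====

-- B swaps the traversal order: column-major accumulation into per-row lists
-- (then keyed by id in a final pass) instead of A's row-major cell-reading loops (alternative).


-- data[c]: dict lookup on the association list (first match; keys are unique in a dict)
def pyGetCol (data : List (String × List String)) (k : String) : Option (List String) :=
  (data.find? (fun kv => kv.1 == k)).map Prod.snd

-- ===== PORT A =====
def INSTINCT_Dictmaker (data : List (String × List String)) : List (String × List String) :=
  match pyGetCol data "id_sub" with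
  | none => []   -- KeyError: excluded by Pre_
  | some ids =>
    ((List.range ids.length).foldl
      (fun (dict : PySem.Dict String (List String)) (i : Nat) =>
        let loads := data.foldl
          (fun loads kv =>
            if kv.1 == "id_sub" then loads
            -- data[col][i]: pyGetD is total, IndexError excluded by Pre_
            else loads ++ [PySem.List.pyGetD kv.2 (i : Int) ""])
          []
        dict.insert (PySem.List.pyGetD ids (i : Int) "") loads)
      PySem.Dict.empty).items

-- ===== PORT B =====
def INSTINCT_Dictmaker_alt (data : List (String × List String)) : List (String × List String) :=
  match pyGetCol data "id_sub" with
  | none => []   -- KeyError: excluded by Pre_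
  | some ids =>
    -- rows = [[] for _ in ids]; then for each non-id column, append its cells column-major
    let rows := data.foldl
      (fun (rs : List (List String)) kv =>
        if kv.1 == "id_sub" then rs
        -- for j in range(len(ids)): rows[j].append(vals[j]); rows has length len(ids)
        else rs.mapIdx (fun j r => r ++ [PySem.List.pyGetD kv.2 (j : Int) ""]))
      (ids.map (fun _ => ([] : List String)))
    -- out = {}; for j in range(len(ids)): out[ids[j]] = rows[j]
    ((List.range ids.length).foldl
      (fun (d : PySem.Dict String (List String)) (j : Nat) =>
        d.insert (PySem.List.pyGetD ids (j : Int) "") (PySem.List.pyGetD rows (j : Int) []))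
      PySem.Dict.empty).items

-- ===== PRECONDITION & SPEC =====
-- Pre_ excludes inputs on which Python A raises: a missing 'id_sub' key (KeyError) and columns
-- shorter than the id column (IndexError).  Keys must be distinct because the association list
-- stands for a Python dict (duplicate keys do not denote any dict input).
def Pre_INSTINCT_Dictmaker (data : List (String × List String)) : Prop :=
  (data.map Prod.fst).Nodup ∧
  (pyGetCol data "id_sub").isSome ∧
  ∀ kv ∈ data, ((pyGetCol data "id_sub").getD []).length ≤ kv.2.length
instance (data : List (String × List String)) : Decidable (Pre_INSTINCT_Dictmaker data) := by unfold Pre_INSTINCT_Dictmaker; infer_instance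

def pvWitness_INSTINCT_Dictmaker : (List (String × List String)) :=
  [("id_sub", ["a", "b"]), ("load1", ["1", "2"]), ("load2", ["3", "4"])]

def Spec_INSTINCT_Dictmaker (data : List (String × List String)) (out : List (String × List String)) : Prop := out = INSTINCT_Dictmaker_alt data
instance (data : List (String × List String)) (out : List (String × List String)) : Decidable (Spec_INSTINCT_Dictmaker data out) := by unfold Spec_INSTINCT_Dictmaker; infer_instance

-- ===== CLAIM (what is proved, stated in full; the proofs are below) =====
def Claim_equal_INSTINCT_Dictmaker : Prop := ∀ (data : List (String × List String)), Dom_INSTINCT_Dictmaker data → Pre_INSTINCT_Dictmaker data → Spec_INSTINCT_Dictmaker data (INSTINCT_Dictmaker data)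

-- ===== LEMMAS AND PROOFS =====

-- A's inner column loop collects, in order, the i-th cell of every non-id column.
theorem innerLoop_eq (data : List (String × List String)) (i : Int) (init : List String) :
    data.foldl
      (fun loads kv =>
        if kv.1 == "id_sub" then loads
        else loads ++ [PySem.List.pyGetD kv.2 i ""]) init
    = init ++ (data.filter (fun kv => kv.1 != "id_sub")).map
        (fun kv => PySem.List.pyGetD kv.2 i "") := by
  induction data generalizing init with
  | nil => simp
  | cons kv rest ih =>
    rw [List.foldl_cons, List.filter_cons]
    by_cases h : kv.1 = "id_sub"
    · rw [if_pos (by simp [h]), if_neg (by simp [h]), ih]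
    · rw [if_neg (by simp [h]), if_pos (by simp [h]), ih]
      simp

-- B's column-major fold: the j-th accumulator ends up holding the j-th cell of every non-id column.
theorem rowsFold_getD (data : List (String × List String)) :
    ∀ (init : List (List String)) (j : Nat), j < init.length →
    (data.foldl
      (fun (rs : List (List String)) kv =>
        if kv.1 == "id_sub" then rs
        else rs.mapIdx (fun k r => r ++ [PySem.List.pyGetD kv.2 (k : Int) ""]))
      init).getD j []
    = init.getD j [] ++ (data.filter (fun kv => kv.1 != "id_sub")).map
        (fun kv => PySem.List.pyGetD kv.2 (j : Int) "") := by
  induction data with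
  | nil => intro init j hj; simp
  | cons kv rest ih =>
    intro init j hj
    rw [List.foldl_cons, List.filter_cons]
    by_cases h : kv.1 = "id_sub"
    · rw [if_pos (by simp [h]), if_neg (by simp [h]), ih init j hj]
    · rw [if_neg (by simp [h]), if_pos (by simp [h]),
        ih _ j (by simpa using hj)]
      have : (init.mapIdx (fun k r => r ++ [PySem.List.pyGetD kv.2 (k : Int) ""])).getD j []
          = init.getD j [] ++ [PySem.List.pyGetD kv.2 (j : Int) ""] := by
        rw [List.getD_eq_getElem _ _ (by simpa using hj), List.getElem_mapIdx,
          List.getD_eq_getElem _ _ hj]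
      rw [this, List.map_cons, List.append_assoc]
      rfl

theorem INSTINCT_Dictmaker_spec : Claim_equal_INSTINCT_Dictmaker := by
  intro data _ hpre
  obtain ⟨_, hsome, _⟩ := hpre
  obtain ⟨ids, hids⟩ := Option.isSome_iff_exists.mp hsome
  unfold Spec_INSTINCT_Dictmaker INSTINCT_Dictmaker INSTINCT_Dictmaker_alt
  rw [hids]
  dsimp only
  congr 1
  apply PySem.List.foldl_congr_mem
  intro acc i hi
  have hin : i < ids.length := List.mem_range.mp hi
  rw [innerLoop_eq, PySem.List.pyGetD_natCast
    (data.foldl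
      (fun (rs : List (List String)) kv =>
        if kv.1 == "id_sub" then rs
        else rs.mapIdx (fun k r => r ++ [PySem.List.pyGetD kv.2 (k : Int) ""]))
      (ids.map (fun _ => ([] : List String)))),
    rowsFold_getD data _ i (by simpa using hin)]
  have : (ids.map (fun _ => ([] : List String))).getD i [] = [] := by
    rw [List.getD_eq_getElem _ _ (by simpa using hin)]; simp
  rw [this]
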